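-- pv_equiv track=rewrite | github.com/wzygxr/shuati | class002_WealthDistributionAndDifferenceArray/Experiment.py | tallest_cow
-- ===== SOURCE A (Python) =====
-- from typing import List, Tuple
--
-- def tallest_cow(n: int, h: int, r: int,
--                relations: List[Tuple[int, int]]) -> List[int]:
--     # 存储需要更新的区间，并去重
--     seen = set()
--     intervals = []
--
--     for rel in relations:
--         a, b = min(rel), max(rel)
--         key = f"{a}-{b}"
--         if key not in seen:
--             seen.add(key)
--             intervals.append((a, b))
--
--     # 使用差分数组
--     diff = [0] * (n + 2)
--
--     for a, b in intervals:
--         if a + 1 <= b - 1: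
--             diff[a + 1] -= 1
--             diff[b] += 1
--
--     # 通过前缀和计算最终高度
--     heights = [h] * (n + 1)
--     current = 0
--     for i in range(1, n + 1):
--         current += diff[i]
--         heights[i] += current
--
--     return heights
-- ===== SOURCE B (Python) =====
-- from typing import List, Tuple
--
-- def tallest_cow(n: int, h: int, r: int,
--                relations: List[Tuple[int, int]]) -> List[int]:
--     # same dedup as the original (order-preserving, string key)
--     seen = set()
--     intervals = []
--     for rel in relations:
--         a, b = min(rel), max(rel)
--         key = f"{a}-{b}"
--         if key not in seen:
--             seen.add(key)
--             intervals.append((a, b))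
--     # direct repeated range updates instead of a difference array + prefix sum
--     heights = [h] * (n + 1)
--     for a, b in intervals:
--         for i in range(a + 1, b):
--             heights[i] -= 1
--     return heights
-- ===== Notes on version B (the rewrite author's own statement) =====
-- stated objective: simpler
-- what changed: B keeps the same dedup pass but replaces the difference array and the prefix-sum pass by directly subtracting 1 from heights[i] for every i strictly inside each deduped interval.
-- outside the precondition, e.g. on tallest_cow(2, 5, 1, [(-1, 2)]): A returns [5, 5, 6], B returns [4, 4, 5]; on tallest_cow(3, 5, 1, [(-4, 1)]): A returns [5, 6, 5, 5], B returns [4, 4, 4, 4]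
import Mathlib
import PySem

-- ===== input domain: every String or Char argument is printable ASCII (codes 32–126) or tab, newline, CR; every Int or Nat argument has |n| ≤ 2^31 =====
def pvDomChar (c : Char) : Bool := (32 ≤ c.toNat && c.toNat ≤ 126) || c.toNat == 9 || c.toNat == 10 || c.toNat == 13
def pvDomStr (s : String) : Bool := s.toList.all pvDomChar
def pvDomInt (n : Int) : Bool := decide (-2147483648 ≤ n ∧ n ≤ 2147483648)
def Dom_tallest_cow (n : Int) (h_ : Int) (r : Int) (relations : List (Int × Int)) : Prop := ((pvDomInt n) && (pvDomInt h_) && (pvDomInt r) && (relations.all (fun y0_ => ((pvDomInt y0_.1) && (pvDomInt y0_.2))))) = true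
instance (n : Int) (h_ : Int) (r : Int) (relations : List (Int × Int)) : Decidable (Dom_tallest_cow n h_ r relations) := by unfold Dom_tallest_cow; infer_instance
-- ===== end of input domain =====

-- B replaces A's difference array + prefix-sum pass by direct repeated range updates (simpler; same
-- dedup pass). Equality of the RETURN value is proved on Pre_; no argument is mutated by either port.

-- ===== PORT A =====
-- shared dedup loop: both Pythons contain this exact loop (min/max, "{a}-{b}" string key, in order)
def dedupIntervals (relations : List (Int × Int)) : List (Int × Int) :=
  (relations.foldl
    (fun (st : PySem.Set String × List (Int × Int)) rel =>
      let a := min rel.1 rel.2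
      let b := max rel.1 rel.2
      let key := PySem.Int.toStr a ++ "-" ++ PySem.Int.toStr b
      if PySem.Set.contains st.1 key then st
      else (PySem.Set.add st.1 key, st.2 ++ [(a, b)]))
    (PySem.Set.empty, [])).2

def tallest_cow (n : Int) (h_ : Int) (r : Int) (relations : List (Int × Int)) : List Int :=
  let intervals := dedupIntervals relations
  let diff : List Int := List.replicate (n + 2).toNat 0
  let diff := intervals.foldl
    (fun diff ab =>
      if ab.1 + 1 ≤ ab.2 - 1 then
        let diff := PySem.List.pySetD diff (ab.1 + 1) (PySem.List.pyGetD diff (ab.1 + 1) 0 - 1)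
        PySem.List.pySetD diff ab.2 (PySem.List.pyGetD diff ab.2 0 + 1)
      else diff) diff
  let st := (PySem.List.pyRange 1 (n + 1)).foldl
    (fun (st : List Int × Int) i =>
      let current := st.2 + PySem.List.pyGetD diff i 0
      (PySem.List.pySetD st.1 i (PySem.List.pyGetD st.1 i 0 + current), current))
    (List.replicate (n + 1).toNat h_, 0)
  st.1

-- ===== PORT B =====
def tallest_cow_alt (n : Int) (h_ : Int) (r : Int) (relations : List (Int × Int)) : List Int :=
  (dedupIntervals relations).foldl
    (fun heights ab =>
      (PySem.List.pyRange (ab.1 + 1) ab.2).foldl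
        (fun hs i => PySem.List.pySetD hs i (PySem.List.pyGetD hs i 0 - 1)) heights)
    (List.replicate (n + 1).toNat h_)

-- ===== PRECONDITION & SPEC =====
-- Pre_ excludes negative n and intervals reaching outside index range 0..n+1: there A either raises
-- IndexError or (for a negative endpoint) Python's negative-index wraparound hits different cells of
-- A's length-(n+2) diff array and B's length-(n+1) heights array, so both values are accidental.
def Pre_tallest_cow (n : Int) (h_ : Int) (r : Int) (relations : List (Int × Int)) : Prop :=
  0 ≤ n ∧ ∀ p ∈ relations,
    min p.1 p.2 + 1 ≤ max p.1 p.2 - 1 → 0 ≤ min p.1 p.2 ∧ max p.1 p.2 ≤ n + 1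
instance (n : Int) (h_ : Int) (r : Int) (relations : List (Int × Int)) : Decidable (Pre_tallest_cow n h_ r relations) := by unfold Pre_tallest_cow; infer_instance

def pvWitness_tallest_cow : Int × Int × Int × (List (Int × Int)) := (3, 10, 2, [(1, 3), (3, 1)])

def Spec_tallest_cow (n : Int) (h_ : Int) (r : Int) (relations : List (Int × Int)) (out : List Int) : Prop := out = tallest_cow_alt n h_ r relations
instance (n : Int) (h_ : Int) (r : Int) (relations : List (Int × Int)) (out : List Int) : Decidable (Spec_tallest_cow n h_ r relations out) := by unfold Spec_tallest_cow; infer_instance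

-- ===== CLAIM (what is proved, stated in full; the proofs are below) =====
def Claim_equal_tallest_cow : Prop := ∀ (n : Int) (h_ : Int) (r : Int) (relations : List (Int × Int)), Dom_tallest_cow n h_ r relations → Pre_tallest_cow n h_ r relations → Spec_tallest_cow n h_ r relations (tallest_cow n h_ r relations)

-- ===== LEMMAS AND PROOFS =====

-- an interval is in bounds whenever it is active (strictly contains an index)
def pvOK (n : Int) (ab : Int × Int) : Prop := ab.1 + 1 ≤ ab.2 - 1 → 0 ≤ ab.1 ∧ ab.2 ≤ n + 1

-- indicator of j lying strictly inside ab
def pvInd (ab : Int × Int) (m : Int) : Int := if ab.1 + 1 ≤ m ∧ m ≤ ab.2 - 1 then 1 else 0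

-- the difference-array contribution of ab at cell m
def pvDelta (ab : Int × Int) (m : Int) : Int :=
  if ab.1 + 1 ≤ ab.2 - 1 then (if m = ab.1 + 1 then -1 else 0) + (if m = ab.2 then 1 else 0) else 0

def pvCnt : List (Int × Int) → Int → Int
  | [], _ => 0
  | ab :: L, m => pvInd ab m + pvCnt L m

def pvDel : List (Int × Int) → Int → Int
  | [], _ => 0
  | ab :: L, m => pvDelta ab m + pvDel L m

-- prefix sum f(1) + … + f(j)
def pvS (f : Nat → Int) : Nat → Int
  | 0 => 0
  | j + 1 => pvS f j + f (j + 1)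

lemma dedup_aux (step : (PySem.Set String × List (Int × Int)) → (Int × Int) → (PySem.Set String × List (Int × Int)))
    (hstep : ∀ st rel, (step st rel).2 = st.2 ∨ (step st rel).2 = st.2 ++ [(min rel.1 rel.2, max rel.1 rel.2)])
    (L : List (Int × Int)) : ∀ st ab, ab ∈ (L.foldl step st).2 →
      ab ∈ st.2 ∨ ∃ p ∈ L, ab = (min p.1 p.2, max p.1 p.2) := by
  induction L with
  | nil => intro st ab h; exact Or.inl h
  | cons rel L ih =>
    intro st ab h
    rcases ih (step st rel) ab h with h' | ⟨p, hp, hab⟩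
    · rcases hstep st rel with he | he
      · rw [he] at h'; exact Or.inl h'
      · rw [he] at h'
        rcases List.mem_append.1 h' with h'' | h''
        · exact Or.inl h''
        · exact Or.inr ⟨rel, List.mem_cons_self .., by simpa using h''⟩
    · exact Or.inr ⟨p, List.mem_cons_of_mem _ hp, hab⟩

lemma dedup_sound (relations : List (Int × Int)) :
    ∀ ab ∈ dedupIntervals relations, ∃ p ∈ relations, ab = (min p.1 p.2, max p.1 p.2) := by
  intro ab hab
  have := dedup_aux
    (fun (st : PySem.Set String × List (Int × Int)) rel =>
      let a := min rel.1 rel.2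
      let b := max rel.1 rel.2
      let key := PySem.Int.toStr a ++ "-" ++ PySem.Int.toStr b
      if PySem.Set.contains st.1 key then st
      else (PySem.Set.add st.1 key, st.2 ++ [(a, b)]))
    (by intro st rel; dsimp only; split <;> simp) relations (PySem.Set.empty, []) ab hab
  simpa [dedupIntervals] using this

lemma set_map_range {β : Type} (N k : Nat) (f : Nat → β) (v : β) (hk : k < N) :
    ((List.range N).map f).set k v = (List.range N).map (fun j => if j = k then v else f j) := by
  apply List.ext_getElem
  · simp
  · intro i h1 h2
    simp only [List.getElem_set, List.getElem_map, List.getElem_range]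
    by_cases hik : i = k <;> simp [hik]
    intro h; exact absurd h.symm hik

lemma getD_replicate_zero (N : Nat) (i : Int) : PySem.List.pyGetD (List.replicate N (0 : Int)) i 0 = 0 := by
  unfold PySem.List.pyGetD PySem.List.pyGet? PySem.List.pyIdx?
  split_ifs <;> simp [List.getElem?_replicate] <;> split_ifs <;> rfl

lemma pvS_congr (f g : Nat → Int) (h : ∀ m, f m = g m) (j : Nat) : pvS f j = pvS g j := by
  induction j with
  | zero => rfl
  | succ j ih => simp [pvS, ih, h]

lemma pvS_add (f g : Nat → Int) (j : Nat) :
    pvS (fun m => f m + g m) j = pvS f j + pvS g j := by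
  induction j with
  | zero => rfl
  | succ j ih => simp [pvS, ih]; ring

lemma pvS_delta (n : Int) (ab : Int × Int) (hok : pvOK n ab) (j : Nat) :
    pvS (fun m => pvDelta ab (m : Int)) j = - pvInd ab (j : Int) := by
  induction j with
  | zero =>
    have h0 : pvInd ab 0 = 0 := by
      unfold pvInd
      split_ifs with h2
      · exfalso; obtain ⟨ha0, _⟩ := hok (by omega); omega
      · rfl
    simp [pvS, h0]
  | succ j ih =>
    by_cases hact : ab.1 + 1 ≤ ab.2 - 1
    · obtain ⟨ha0, hb0⟩ := hok hact
      simp only [pvS, ih]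
      unfold pvInd pvDelta
      split_ifs <;> omega
    · simp only [pvS, ih]
      unfold pvInd pvDelta
      split_ifs <;> omega

lemma pvS_zero (j : Nat) : pvS (fun _ => (0 : Int)) j = 0 := by
  induction j with
  | zero => rfl
  | succ j ih => simp [pvS, ih]

lemma pvS_del (n : Int) (L : List (Int × Int)) (hok : ∀ ab ∈ L, pvOK n ab) (j : Nat) :
    pvS (fun m => pvDel L (m : Int)) j = - pvCnt L (j : Int) := by
  induction L with
  | nil =>
    have : pvS (fun m => pvDel [] (m : Int)) j = pvS (fun _ => (0 : Int)) j :=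
      pvS_congr _ _ (fun m => rfl) j
    simp [this, pvS_zero, pvCnt]
  | cons ab L ih =>
    have h1 : ∀ m : Nat, pvDel (ab :: L) (m : Int) = pvDelta ab (m : Int) + pvDel L (m : Int) := fun m => rfl
    rw [pvS_congr _ _ h1, pvS_add, pvS_delta n ab (hok ab (List.mem_cons_self ..)),
        ih (fun x hx => hok x (List.mem_cons_of_mem _ hx))]
    simp [pvCnt]; ring

lemma pvCnt_zero (n : Int) (L : List (Int × Int)) (hok : ∀ ab ∈ L, pvOK n ab) :
    pvCnt L 0 = 0 := by
  induction L with
  | nil => rfl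
  | cons ab L ih =>
    have h1 := hok ab (List.mem_cons_self ..)
    simp only [pvCnt, pvInd, pvOK] at *
    rw [ih (fun x hx => hok x (List.mem_cons_of_mem _ hx))]
    split_ifs with h2
    · exact absurd h2.1 (by have := h1 (by omega); omega)
    · rfl

-- B inner loop: subtracting over range [a, b) pointwise
lemma rangeSub_aux (N : Nat) : ∀ (k : Nat) (a b : Int) (f : Nat → Int), (b - a).toNat = k → 0 ≤ a → b ≤ (N : Int) →
    (PySem.List.pyRange a b).foldl
        (fun hs i => PySem.List.pySetD hs i (PySem.List.pyGetD hs i 0 - 1)) ((List.range N).map f)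
      = (List.range N).map (fun j => f j - if a ≤ (j : Int) ∧ (j : Int) ≤ b - 1 then 1 else 0) := by
  intro k
  induction k with
  | zero =>
    intro a b f hk ha hb
    rw [PySem.List.pyRange_one_eq_nil (by omega)]
    simp only [List.foldl_nil]
    refine List.map_congr_left fun j hj => ?_
    rw [if_neg (by omega)]
    ring
  | succ k ih =>
    intro a b f hk ha hb
    have hab : a < b := by omega
    have haN : a.toNat < N := by omega
    have haa : ((a.toNat : Nat) : Int) = a := Int.toNat_of_nonneg ha
    rw [PySem.List.pyRange_one_cons hab]
    simp only [List.foldl_cons]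
    rw [PySem.List.pySetD_of_nonneg _ _ ha, PySem.List.pyGetD_of_nonneg _ _ ha,
        PySem.List.getD_map_range f N a.toNat 0 haN, set_map_range N a.toNat f _ haN,
        ih (a + 1) b _ (by omega) (by omega) hb]
    refine List.map_congr_left fun j hj => ?_
    have hjN : j < N := List.mem_range.1 hj
    by_cases hja : j = a.toNat
    · subst hja
      rw [if_pos rfl, if_neg (by omega), if_pos ⟨by omega, by omega⟩]
      ring
    · have hja' : ((j : Int)) ≠ a := by omega
      rw [if_neg hja]
      by_cases hc : a + 1 ≤ (j : Int) ∧ (j : Int) ≤ b - 1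
      · rw [if_pos hc, if_pos ⟨by omega, hc.2⟩]
      · rw [if_neg hc, if_neg (by intro hc2; exact hc ⟨by omega, hc2.2⟩)]

lemma rangeSub_char (N : Nat) (a b : Int) (f : Nat → Int) (ha : 0 ≤ a) (hb : b ≤ (N : Int)) :
    (PySem.List.pyRange a b).foldl
        (fun hs i => PySem.List.pySetD hs i (PySem.List.pyGetD hs i 0 - 1)) ((List.range N).map f)
      = (List.range N).map (fun j => f j - if a ≤ (j : Int) ∧ (j : Int) ≤ b - 1 then 1 else 0) :=
  rangeSub_aux N (b - a).toNat a b f rfl ha hb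

-- B outer loop
lemma bFold_char (n : Int) (L : List (Int × Int)) (hok : ∀ ab ∈ L, pvOK n ab) (hn : 0 ≤ n)
    (f : Nat → Int) :
    L.foldl (fun heights ab =>
        (PySem.List.pyRange (ab.1 + 1) ab.2).foldl
          (fun hs i => PySem.List.pySetD hs i (PySem.List.pyGetD hs i 0 - 1)) heights)
      ((List.range (n.toNat + 1)).map f)
      = (List.range (n.toNat + 1)).map (fun j => f j - pvCnt L (j : Int)) := by
  revert hok
  induction L generalizing f with
  | nil =>
    intro hok
    simp only [List.foldl_nil]
    refine (List.map_congr_left fun j hj => ?_).symm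
    simp [pvCnt]
  | cons ab L ih =>
    intro hok
    simp only [List.foldl_cons]
    by_cases hact : ab.1 + 1 ≤ ab.2 - 1
    · obtain ⟨ha0, hb0⟩ := hok ab (List.mem_cons_self ..) hact
      rw [rangeSub_char (n.toNat + 1) (ab.1 + 1) ab.2 f (by omega) (by push_cast; omega)]
      rw [ih _ (fun x hx => hok x (List.mem_cons_of_mem _ hx))]
      refine List.map_congr_left fun j hj => ?_
      show _ - _ = _ - (pvInd ab _ + pvCnt L _)
      unfold pvInd
      ring
    · rw [PySem.List.pyRange_one_eq_nil (by omega)]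
      simp only [List.foldl_nil]
      rw [ih f (fun x hx => hok x (List.mem_cons_of_mem _ hx))]
      refine List.map_congr_left fun j hj => ?_
      have hz : pvInd ab (j : Int) = 0 := by unfold pvInd; rw [if_neg (by omega)]
      show _ - _ = _ - (pvInd ab _ + pvCnt L _)
      rw [hz]
      ring

-- A diff update: one step changes the diff pointwise by pvDelta
lemma diffStep_char (n : Int) (diff : List Int) (hlen : diff.length = n.toNat + 2)
    (ab : Int × Int) (hok : pvOK n ab) (hn : 0 ≤ n) (j : Nat) :
    PySem.List.pyGetD
        ((if ab.1 + 1 ≤ ab.2 - 1 then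
            let d := PySem.List.pySetD diff (ab.1 + 1) (PySem.List.pyGetD diff (ab.1 + 1) 0 - 1)
            PySem.List.pySetD d ab.2 (PySem.List.pyGetD d ab.2 0 + 1)
          else diff)) (j : Int) 0
      = PySem.List.pyGetD diff (j : Int) 0 + pvDelta ab (j : Int) := by
  by_cases hact : ab.1 + 1 ≤ ab.2 - 1
  · obtain ⟨ha0, hb0⟩ := hok hact
    rw [if_pos hact]
    unfold pvDelta
    rw [if_pos hact]
    have hA : (ab.1 + 1) = (((ab.1 + 1).toNat : Nat) : Int) := (Int.toNat_of_nonneg (by omega)).symm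
    have hB : ab.2 = ((ab.2.toNat : Nat) : Int) := (Int.toNat_of_nonneg (by omega)).symm
    have hAlen : (ab.1 + 1).toNat < diff.length := by omega
    have hBlen : ab.2.toNat < (PySem.List.pySetD diff (ab.1 + 1) (PySem.List.pyGetD diff (ab.1 + 1) 0 - 1)).length := by
      rw [PySem.List.length_pySetD]; omega
    show PySem.List.pyGetD (PySem.List.pySetD _ ab.2 _) (j : Int) 0 = _
    rw [hB, hA]
    have hv : PySem.List.pyGetD (PySem.List.pySetD diff (((ab.1 + 1).toNat : Nat) : Int)
          (PySem.List.pyGetD diff (((ab.1 + 1).toNat : Nat) : Int) 0 - 1)) ((ab.2.toNat : Nat) : Int) 0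
        = PySem.List.pyGetD diff ((ab.2.toNat : Nat) : Int) 0 := by
      rw [PySem.List.pyGetD_pySetD_natCast _ _ ab.2.toNat _ 0 hAlen, if_neg (by omega)]
    rw [hv]
    rw [PySem.List.pyGetD_pySetD_natCast _ _ j _ 0 (by rw [PySem.List.length_pySetD]; omega)]
    rw [PySem.List.pyGetD_pySetD_natCast _ _ j _ 0 hAlen]
    by_cases hjB : j = ab.2.toNat
    · subst hjB
      have h1 : ab.2.toNat ≠ (ab.1 + 1).toNat := by omega
      simp
      omega
    · by_cases hjA : j = (ab.1 + 1).toNat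
      · subst hjA
        have h1 : (ab.1 + 1).toNat ≠ ab.2.toNat := by omega
        simp [h1]
        rw [if_neg (by omega)]
        ring
      · simp [hjA, hjB]
        rw [if_neg (by omega), if_neg (by omega)]
        ring
  · simp [pvDelta, hact]

lemma diffFold_char (n : Int) (L : List (Int × Int)) (hok : ∀ ab ∈ L, pvOK n ab) (hn : 0 ≤ n) :
    ∀ (diff : List Int), diff.length = n.toNat + 2 → ∀ j : Nat,
    PySem.List.pyGetD
        (L.foldl (fun diff ab =>
          if ab.1 + 1 ≤ ab.2 - 1 then
            let d := PySem.List.pySetD diff (ab.1 + 1) (PySem.List.pyGetD diff (ab.1 + 1) 0 - 1)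
            PySem.List.pySetD d ab.2 (PySem.List.pyGetD d ab.2 0 + 1)
          else diff) diff) (j : Int) 0
      = PySem.List.pyGetD diff (j : Int) 0 + pvDel L (j : Int) := by
  induction L with
  | nil => intro diff hlen j; simp [pvDel]
  | cons ab L ih =>
    intro diff hlen j
    simp only [List.foldl_cons]
    have hstep := diffStep_char n diff hlen ab (hok ab (List.mem_cons_self ..)) hn
    have hlen' : (if ab.1 + 1 ≤ ab.2 - 1 then
            let d := PySem.List.pySetD diff (ab.1 + 1) (PySem.List.pyGetD diff (ab.1 + 1) 0 - 1)
            PySem.List.pySetD d ab.2 (PySem.List.pyGetD d ab.2 0 + 1)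
          else diff).length = n.toNat + 2 := by
      split <;> simp [PySem.List.length_pySetD, hlen]
    rw [ih (fun x hx => hok x (List.mem_cons_of_mem _ hx)) _ hlen' j, hstep j]
    show _ = _ + (pvDelta ab (j : Int) + pvDel L (j : Int))
    ring

-- A prefix-sum loop characterisation
lemma prefix_char (n : Int) (hn : 0 ≤ n) (h_ : Int) (diff : List Int) (k : Nat) (hk : (k : Int) ≤ n) :
    (PySem.List.pyRange 1 ((k : Int) + 1)).foldl
        (fun (st : List Int × Int) i =>
          let current := st.2 + PySem.List.pyGetD diff i 0
          (PySem.List.pySetD st.1 i (PySem.List.pyGetD st.1 i 0 + current), current))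
        ((List.range (n.toNat + 1)).map (fun _ => h_), 0)
      = ((List.range (n.toNat + 1)).map
          (fun j => if 1 ≤ j ∧ j ≤ k then h_ + pvS (fun m => PySem.List.pyGetD diff (m : Int) 0) j else h_),
         pvS (fun m => PySem.List.pyGetD diff (m : Int) 0) k) := by
  induction k with
  | zero =>
    rw [show (((0 : Nat) : Int) + 1) = 1 by norm_num, PySem.List.pyRange_one_eq_nil le_rfl]
    simp only [List.foldl_nil, pvS]
    refine Prod.ext ?_ rfl
    refine List.map_congr_left fun j hj => ?_
    rw [if_neg (by omega)]
  | succ k ih =>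
    have hk' : ((k : Nat) : Int) ≤ n := by push_cast at hk ⊢; omega
    have hcast : (((k + 1 : Nat) : Int)) + 1 = ((k : Int) + 1) + 1 := by push_cast; ring
    rw [hcast, PySem.List.pyRange_one_succ_right (by omega), List.foldl_append, ih hk']
    simp only [List.foldl_cons, List.foldl_nil]
    have hkN : k + 1 < n.toNat + 1 := by omega
    have hidx : ((k : Int) + 1) = (((k + 1 : Nat)) : Int) := by push_cast; ring
    rw [hidx, PySem.List.pyGetD_of_nonneg _ _ (by positivity), PySem.List.pySetD_natCast]
    rw [show (((k + 1 : Nat) : Int)).toNat = k + 1 by omega]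
    rw [PySem.List.getD_map_range _ _ _ _ hkN, set_map_range _ _ _ _ hkN]
    rw [if_neg (by omega)]
    refine Prod.ext ?_ ?_
    · refine List.map_congr_left fun j hj => ?_
      by_cases hjk : j = k + 1
      · subst hjk
        rw [if_pos rfl, if_pos (by omega)]
        show _ + (_ + _) = _ + pvS _ (k + 1)
        simp only [pvS]
      · rw [if_neg hjk]
        by_cases hc : 1 ≤ j ∧ j ≤ k
        · rw [if_pos hc, if_pos ⟨hc.1, by omega⟩]
        · rw [if_neg hc, if_neg (by intro hc2; exact hc ⟨hc2.1, by omega⟩)]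
    · show _ + _ = pvS _ (k + 1)
      simp only [pvS]

-- ===== VERDICT (by name: the statement is the Claim_ definition above) =====
theorem tallest_cow_spec : Claim_equal_tallest_cow := by
  intro n h_ r relations _ hpre
  obtain ⟨hn, hrel⟩ := hpre
  have hok : ∀ ab ∈ dedupIntervals relations, pvOK n ab := by
    intro ab hab
    obtain ⟨p, hp, rfl⟩ := dedup_sound relations ab hab
    intro hact
    exact hrel p hp hact
  unfold Spec_tallest_cow tallest_cow tallest_cow_alt
  have hn1 : (n + 1).toNat = n.toNat + 1 := by omega
  have hn2 : (n + 2).toNat = n.toNat + 2 := by omega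
  have hrep : List.replicate (n.toNat + 1) h_ = (List.range (n.toNat + 1)).map (fun _ => h_) := by
    refine (List.eq_replicate_iff.2 ⟨by simp, ?_⟩).symm
    intro b hb
    simp at hb
    exact hb
  simp only [hn1, hn2, hrep]
  rw [bFold_char n (dedupIntervals relations) hok hn (fun _ => h_)]
  have hr : (n + 1 : Int) = ((n.toNat : Nat) : Int) + 1 := by omega
  rw [hr, prefix_char n hn h_ _ n.toNat (by omega)]
  refine List.map_congr_left fun j hj => ?_
  have hjlt : j < n.toNat + 1 := List.mem_range.1 hj
  have hS : pvS (fun m => PySem.List.pyGetD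
        ((dedupIntervals relations).foldl (fun diff ab =>
          if ab.1 + 1 ≤ ab.2 - 1 then
            let d := PySem.List.pySetD diff (ab.1 + 1) (PySem.List.pyGetD diff (ab.1 + 1) 0 - 1)
            PySem.List.pySetD d ab.2 (PySem.List.pyGetD d ab.2 0 + 1)
          else diff) (List.replicate (n.toNat + 2) 0)) (m : Int) 0) j = - pvCnt (dedupIntervals relations) (j : Int) := by
    refine (pvS_congr _ (fun m => pvDel (dedupIntervals relations) (m : Int)) (fun m => ?_) j).trans
      (pvS_del n (dedupIntervals relations) hok j)
    rw [diffFold_char n (dedupIntervals relations) hok hn (List.replicate (n.toNat + 2) 0) (by simp) m,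
        getD_replicate_zero]
    ring
  by_cases hj0 : 1 ≤ j
  · rw [if_pos ⟨hj0, by omega⟩, hS]
    ring
  · have hj00 : j = 0 := by omega
    subst hj00
    rw [if_neg (by omega)]
    have := pvCnt_zero n (dedupIntervals relations) hok
    simp [this]
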